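-- pv_equiv track=rewrite | github.com/xmarre/ComfyUI-DiffAid-Patches | nodes.py | _remap_paper_sparse_flux_indices
-- ===== SOURCE A (Python) =====
-- from typing import Dict, Iterable, List, Optional, Sequence, Tuple
--
-- PAPER_SPARSE_FLUX_COMBINED_BLOCKS: Tuple[int, ...] = (1, 15, 36, 41, 48)
--
-- PAPER_SOURCE_FLUX_DOUBLE_BLOCKS = 19
--
-- PAPER_SOURCE_FLUX_SINGLE_BLOCKS = 38
--
-- def _dedupe_preserve_order(values: Iterable[int]) -> List[int]:
--     seen = set()
--     out: List[int] = []
--     for value in values: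
--         if value in seen:
--             continue
--         seen.add(value)
--         out.append(value)
--     return out
--
-- def _remap_stage_indices(indices_1based: Sequence[int], source_total: int, target_total: int) -> List[int]:
--     if source_total <= 0:
--         raise ValueError(f"source_total must be positive, got {source_total}.")
--     if target_total <= 0:
--         raise ValueError(f"target_total must be positive, got {target_total}.")
--
--     out: List[int] = []
--     for index_1based in indices_1based:
--         if index_1based <= 0 or index_1based > source_total:
--             raise ValueError(f"Stage-local block index {index_1based} is outside the source range 1..{source_total}.")
--         if source_total == 1 or target_total == 1:
--             out.append(1)
--             continue
--         scaled = round((index_1based - 1) * (target_total - 1) / (source_total - 1)) + 1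
--         out.append(int(scaled))
--     return _dedupe_preserve_order(out)
--
-- def _paper_sparse_flux_source_double_indices() -> List[int]:
--     return [index for index in PAPER_SPARSE_FLUX_COMBINED_BLOCKS if index <= PAPER_SOURCE_FLUX_DOUBLE_BLOCKS]
--
-- def _paper_sparse_flux_source_single_indices() -> List[int]:
--     return [
--         index - PAPER_SOURCE_FLUX_DOUBLE_BLOCKS
--         for index in PAPER_SPARSE_FLUX_COMBINED_BLOCKS
--         if index > PAPER_SOURCE_FLUX_DOUBLE_BLOCKS
--     ]
--
-- def _remap_paper_sparse_flux_double_only_indices(total_double: int) -> List[int]: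
--     return _remap_stage_indices(
--         _paper_sparse_flux_source_double_indices(),
--         PAPER_SOURCE_FLUX_DOUBLE_BLOCKS,
--         total_double,
--     )
--
-- def _remap_paper_sparse_flux_indices(total_double: int, total_single: int) -> List[int]:
--     mapped_double = _remap_paper_sparse_flux_double_only_indices(total_double)
--     mapped_single_local = _remap_stage_indices(
--         _paper_sparse_flux_source_single_indices(),
--         PAPER_SOURCE_FLUX_SINGLE_BLOCKS,
--         total_single,
--     )
--     mapped_single_combined = [total_double + index for index in mapped_single_local]
--     return _dedupe_preserve_order([*mapped_double, *mapped_single_combined])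
-- ===== SOURCE B (Python) =====
-- PAPER_SPARSE_FLUX_COMBINED_BLOCKS = (1, 15, 36, 41, 48)
--
-- PAPER_SOURCE_FLUX_DOUBLE_BLOCKS = 19
-- PAPER_SOURCE_FLUX_SINGLE_BLOCKS = 38
--
--
-- def _round_half_even_div(p, q):
--     # banker's rounding of p / q for q > 0, in exact integer arithmetic (no floats)
--     d, r = divmod(p, q)
--     twice = 2 * r
--     if twice > q or (twice == q and d % 2 == 1):
--         d += 1
--     return d
--
--
-- def _remap_paper_sparse_flux_indices(total_double, total_single):
--     if total_double <= 0:
--         raise ValueError(f"target_total must be positive, got {total_double}.")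
--     if total_single <= 0:
--         raise ValueError(f"target_total must be positive, got {total_single}.")
--     # The remap is monotone over the (sorted) paper block list and the single-stage
--     # values all exceed the double-stage ones, so duplicates can only be adjacent:
--     # an O(1)-memory comparison with the last emitted value replaces set-based dedupe.
--     out = []
--     for block in PAPER_SPARSE_FLUX_COMBINED_BLOCKS:
--         if block <= PAPER_SOURCE_FLUX_DOUBLE_BLOCKS:
--             if total_double == 1:
--                 v = 1
--             else:
--                 v = _round_half_even_div((block - 1) * (total_double - 1),
--                                          PAPER_SOURCE_FLUX_DOUBLE_BLOCKS - 1) + 1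
--         else:
--             local = block - PAPER_SOURCE_FLUX_DOUBLE_BLOCKS
--             if total_single == 1:
--                 v = total_double + 1
--             else:
--                 v = total_double + _round_half_even_div((local - 1) * (total_single - 1),
--                                                         PAPER_SOURCE_FLUX_SINGLE_BLOCKS - 1) + 1
--         if not out or out[-1] != v:
--             out.append(v)
--     return out
-- ===== Notes on version B (the rewrite author's own statement) =====
-- stated objective: alternative
-- what changed: B drops A's staged remap helpers and all three seen-set dedupe passes: one loop scales each combined block with exact integer half-even rounding (no floats) and dedupes by comparing against the last emitted value only, which is correct because the remap is monotone over the sorted block list so duplicates are always adjacent.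
import Mathlib
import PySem

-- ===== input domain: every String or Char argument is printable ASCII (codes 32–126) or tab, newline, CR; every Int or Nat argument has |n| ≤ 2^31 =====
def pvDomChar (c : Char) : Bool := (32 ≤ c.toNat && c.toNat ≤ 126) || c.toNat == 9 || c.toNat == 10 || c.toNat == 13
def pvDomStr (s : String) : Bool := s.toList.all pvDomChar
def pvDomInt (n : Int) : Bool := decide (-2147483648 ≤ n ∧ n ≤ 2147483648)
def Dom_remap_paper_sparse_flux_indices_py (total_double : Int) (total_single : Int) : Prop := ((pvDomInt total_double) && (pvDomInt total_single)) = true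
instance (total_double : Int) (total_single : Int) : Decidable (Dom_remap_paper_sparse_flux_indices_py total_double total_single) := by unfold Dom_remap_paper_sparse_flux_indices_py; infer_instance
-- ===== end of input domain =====

-- B replaces A's staged remap helpers with one pass that scales each block by exact integer
-- half-even rounding and dedupes by comparing with the last emitted value (the remap is
-- monotone, so duplicates are adjacent); no set/dict dedupe at all (objective: alternative).

-- Banker's rounding of p / q for 0 < q, as A's float `round((…)/(…))` computes it for the calls
-- A makes on Dom-sized inputs (q ∈ {18, 37}, |p| < 2^53, where the float quotient is exactly a
-- half-integer only at true rational ties).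
def pvRound (p q : Int) : Int :=
  let d := PySem.Int.floordiv p q
  let r := PySem.Int.mod p q
  if 2 * r < q then d
  else if q < 2 * r then d + 1
  else if PySem.Int.mod d 2 = 0 then d else d + 1

-- ===== PORT A =====
-- _dedupe_preserve_order: seen-set + output list loop
def pvDedupeA (values : List Int) : List Int :=
  (values.foldl
    (fun (st : PySem.Set Int × List Int) v =>
      if PySem.Set.contains st.1 v then st else (PySem.Set.add st.1 v, st.2 ++ [v]))
    (PySem.Set.empty, [])).2

-- _remap_stage_indices; the two `raise ValueError` sites return [] here (excluded by Pre_ /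
-- unreachable for the constant index lists A passes)
def pvRemapStage (indices_1based : List Int) (source_total target_total : Int) : List Int :=
  if source_total ≤ 0 then []
  else if target_total ≤ 0 then []
  else
    pvDedupeA (indices_1based.foldl
      (fun out index_1based =>
        if index_1based ≤ 0 ∨ index_1based > source_total then out
        else if source_total = 1 ∨ target_total = 1 then out ++ [1]
        else out ++ [pvRound ((index_1based - 1) * (target_total - 1)) (source_total - 1) + 1])
      [])

def pvPaperBlocks : List Int := [1, 15, 36, 41, 48]

def pvSourceDoubleIdx : List Int := pvPaperBlocks.filter (fun index => decide (index ≤ 19))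

def pvSourceSingleIdx : List Int :=
  (pvPaperBlocks.filter (fun index => decide (19 < index))).map (fun index => index - 19)

def remap_paper_sparse_flux_indices_py (total_double : Int) (total_single : Int) : List Int :=
  let mapped_double := pvRemapStage pvSourceDoubleIdx 19 total_double
  let mapped_single_local := pvRemapStage pvSourceSingleIdx 38 total_single
  let mapped_single_combined := mapped_single_local.map (fun index => total_double + index)
  pvDedupeA (mapped_double ++ mapped_single_combined)

-- ===== PORT B =====
-- _round_half_even_div: banker's rounding of p / q (q > 0) in exact integer arithmetic
def pvRoundB (p q : Int) : Int :=
  let d := PySem.Int.floordiv p q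
  let r := PySem.Int.mod p q
  if 2 * r > q ∨ (2 * r = q ∧ PySem.Int.mod d 2 = 1) then d + 1 else d

-- the two `raise ValueError` sites of B's validation return [] here (excluded by Pre_)
def remap_paper_sparse_flux_indices_py_alt (total_double : Int) (total_single : Int) : List Int :=
  if total_double ≤ 0 then []
  else if total_single ≤ 0 then []
  else
    ([1, 15, 36, 41, 48] : List Int).foldl
      (fun (out : List Int) (block : Int) =>
        let v : Int :=
          if block ≤ 19 then
            if total_double = 1 then 1
            else pvRoundB ((block - 1) * (total_double - 1)) (19 - 1) + 1
          else
            let lcl := block - 19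
            if total_single = 1 then total_double + 1
            else total_double + pvRoundB ((lcl - 1) * (total_single - 1)) (38 - 1) + 1
        if out = [] ∨ out.getLast? ≠ some v then out ++ [v] else out)
      []

-- ===== PRECONDITION & SPEC =====
-- A raises ValueError ("target_total must be positive") when total_double ≤ 0 or total_single ≤ 0
def Pre_remap_paper_sparse_flux_indices_py (total_double : Int) (total_single : Int) : Prop :=
  0 < total_double ∧ 0 < total_single
instance (total_double : Int) (total_single : Int) : Decidable (Pre_remap_paper_sparse_flux_indices_py total_double total_single) := by unfold Pre_remap_paper_sparse_flux_indices_py; infer_instance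

def pvWitness_remap_paper_sparse_flux_indices_py : Int × Int := (3, 5)

def Spec_remap_paper_sparse_flux_indices_py (total_double : Int) (total_single : Int) (out : List Int) : Prop := out = remap_paper_sparse_flux_indices_py_alt total_double total_single
instance (total_double : Int) (total_single : Int) (out : List Int) : Decidable (Spec_remap_paper_sparse_flux_indices_py total_double total_single out) := by unfold Spec_remap_paper_sparse_flux_indices_py; infer_instance

-- ===== CLAIM (what is proved, stated in full; the proofs are below) =====
def Claim_equal_remap_paper_sparse_flux_indices_py : Prop := ∀ (total_double : Int) (total_single : Int), Dom_remap_paper_sparse_flux_indices_py total_double total_single → Pre_remap_paper_sparse_flux_indices_py total_double total_single → Spec_remap_paper_sparse_flux_indices_py total_double total_single (remap_paper_sparse_flux_indices_py total_double total_single)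

-- ===== LEMMAS AND PROOFS =====

-- B's two integer branches compute exactly A's three-way banker's rounding
theorem pvRoundB_eq (p q : Int) (hq : 0 < q) : pvRoundB p q = pvRound p q := by
  have h0 : 0 ≤ PySem.Int.mod p q := PySem.Int.mod_nonneg p hq
  have h1 : PySem.Int.mod p q < q := PySem.Int.mod_lt p hq
  have h2 := PySem.Int.mod_two_eq (PySem.Int.floordiv p q)
  unfold pvRoundB pvRound
  dsimp only
  split_ifs <;> omega

-- A's seen-set/out-list pair stays equal componentwise, so _dedupe_preserve_order is the
-- ordered dedup PySem.List.dedup.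
theorem pvDedupeA_go (xs : List Int) (s : PySem.Set Int) :
    xs.foldl
      (fun (st : PySem.Set Int × List Int) v =>
        if PySem.Set.contains st.1 v then st else (PySem.Set.add st.1 v, st.2 ++ [v]))
      (s, s)
    = (xs.foldl PySem.Set.add s, xs.foldl PySem.Set.add s) := by
  induction xs generalizing s with
  | nil => rfl
  | cons x xs ih =>
    by_cases h : x ∈ s
    · simp only [List.foldl_cons, (PySem.Set.contains_iff s x).mpr h, if_pos,
        PySem.Set.add_of_mem h, ih]
    · have hc : PySem.Set.contains s x = false := by
        by_contra hb
        exact h ((PySem.Set.contains_iff s x).mp (by simpa using hb))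
      have ha : PySem.Set.add s x = s ++ [x] := by
        simp [PySem.Set.add, h]
      simp only [List.foldl_cons, hc, Bool.false_eq_true, if_false, ha, ih]

theorem pvDedupeA_eq_dedup (xs : List Int) : pvDedupeA xs = PySem.List.dedup xs := by
  rw [PySem.List.dedup_eq_ofList, PySem.Set.ofList_eq_foldl, pvDedupeA]
  have : (PySem.Set.empty : PySem.Set Int) = ([] : List Int) := rfl
  rw [this, pvDedupeA_go]

-- the elements a dedup loop appends to `seen`
def pvNew (seen : List Int) : List Int → List Int
  | [] => []
  | y :: ys => if y ∈ seen then pvNew seen ys else y :: pvNew (seen ++ [y]) ys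

theorem foldl_add_eq_append : ∀ (ys : List Int) (a : PySem.Set Int),
    List.foldl PySem.Set.add a ys = a ++ pvNew a ys := by
  intro ys
  induction ys with
  | nil => intro a; simp [pvNew]
  | cons y ys ih =>
    intro a
    by_cases h : y ∈ a
    · simp [pvNew, h, ih]
    · have hc : PySem.Set.contains a y = false := by
        by_contra hb
        exact h ((PySem.Set.contains_iff a y).mp (by simpa using hb))
      simp [pvNew, h, PySem.Set.add, ih]

-- folding adds over the deduped (pvNew) images equals folding over all images
theorem foldl_add_map_pvNew (g : Int → Int) :
    ∀ (ys : List Int) (a : PySem.Set Int) (s : PySem.Set Int),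
      (∀ y ∈ a, g y ∈ s) →
      List.foldl PySem.Set.add s ((pvNew a ys).map g)
        = List.foldl PySem.Set.add s (ys.map g) := by
  intro ys
  induction ys with
  | nil => intro a s _; rfl
  | cons y ys ih =>
    intro a s hmem
    by_cases h : y ∈ a
    · have hgy : g y ∈ s := hmem y h
      simp only [pvNew, h, if_pos, List.map_cons, List.foldl_cons,
        PySem.Set.add_of_mem hgy]
      exact ih a s hmem
    · simp only [pvNew, h, if_false, List.map_cons, List.foldl_cons]
      refine ih (a ++ [y]) (PySem.Set.add s (g y)) ?_
      intro z hz
      rcases List.mem_append.mp hz with hz | hz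
      · exact (PySem.Set.mem_add s (g y) (g z)).mpr (Or.inl (hmem z hz))
      · simp only [List.mem_singleton] at hz
        rw [hz]
        exact (PySem.Set.mem_add s (g y) (g y)).mpr (Or.inr rfl)

-- merging A's three dedup passes into one over the combined raw list
theorem dedup_merge (D S : List Int) (g : Int → Int) :
    PySem.List.dedup (PySem.List.dedup D ++ (PySem.List.dedup S).map g)
      = PySem.List.dedup (D ++ S.map g) := by
  have hS : PySem.List.dedup S = pvNew [] S := by
    rw [PySem.List.dedup_eq_ofList, PySem.Set.ofList_eq_foldl, foldl_add_eq_append]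
    simp
  calc PySem.List.dedup (PySem.List.dedup D ++ (PySem.List.dedup S).map g)
      = List.foldl PySem.Set.add (PySem.Set.ofList (PySem.Set.ofList D))
          ((PySem.List.dedup S).map g) := by
        rw [PySem.List.dedup_eq_ofList, PySem.Set.ofList_eq_foldl, List.foldl_append,
          ← PySem.Set.ofList_eq_foldl, PySem.List.dedup_eq_ofList]
    _ = List.foldl PySem.Set.add (PySem.Set.ofList D) ((pvNew [] S).map g) := by
        rw [PySem.Set.ofList_ofList, hS]
    _ = List.foldl PySem.Set.add (PySem.Set.ofList D) (S.map g) := by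
        exact foldl_add_map_pvNew g S [] (PySem.Set.ofList D) (fun y hy => absurd hy (List.not_mem_nil))
    _ = PySem.List.dedup (D ++ S.map g) := by
        rw [PySem.List.dedup_eq_ofList (D ++ S.map g),
          PySem.Set.ofList_eq_foldl (D ++ S.map g), List.foldl_append,
          ← PySem.Set.ofList_eq_foldl]

-- B's adjacent-comparison dedupe step
def adjStep (out : List Int) (v : Int) : List Int :=
  if out = [] ∨ out.getLast? ≠ some v then out ++ [v] else out

-- on a nondecreasing stream the seen-set check x ∈ seen is exactly x = last emitted
theorem foldA_eq_adj (xs : List Int) (seen : PySem.Set Int) (out : List Int) (last : Int)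
    (hlast : out.getLast? = some last)
    (hseen : ∀ y ∈ seen, y ≤ last) (hmem : last ∈ seen)
    (hsorted : xs.Pairwise (· ≤ ·)) (hge : ∀ x ∈ xs, last ≤ x) :
    (xs.foldl
      (fun (st : PySem.Set Int × List Int) v =>
        if PySem.Set.contains st.1 v then st else (PySem.Set.add st.1 v, st.2 ++ [v]))
      (seen, out)).2
    = xs.foldl adjStep out := by
  induction xs generalizing seen out last with
  | nil => rfl
  | cons x xs ih =>
    have hxlast : last ≤ x := hge x (List.mem_cons_self)
    have hxs : ∀ z ∈ xs, x ≤ z := (List.pairwise_cons.mp hsorted).1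
    have hsorted' : xs.Pairwise (· ≤ ·) := (List.pairwise_cons.mp hsorted).2
    by_cases h : x ∈ seen
    · have hx : x = last := le_antisymm (hseen x h) hxlast
      have hc : PySem.Set.contains seen x = true := (PySem.Set.contains_iff seen x).mpr h
      have hne : out ≠ [] := by
        intro hnil; rw [hnil] at hlast; simp at hlast
      have hadj : adjStep out x = out := by
        simp [adjStep, hlast, hx, hne]
      simp only [List.foldl_cons, hc, if_pos, hadj]
      exact ih seen out last hlast hseen hmem hsorted'
        (fun z hz => le_trans hxlast (hx ▸ hxs z hz))
    · have hc : PySem.Set.contains seen x = false := by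
        by_contra hb
        exact h ((PySem.Set.contains_iff seen x).mp (by simpa using hb))
      have hxne : x ≠ last := fun he => h (he ▸ hmem)
      have hadj : adjStep out x = out ++ [x] := by
        have hne2 : out.getLast? ≠ some x := by
          rw [hlast]
          exact fun he => hxne (Option.some.inj he).symm
        simp [adjStep, hne2]
      simp only [List.foldl_cons, hc, Bool.false_eq_true, if_false, hadj]
      refine ih (PySem.Set.add seen x) (out ++ [x]) x (by simp) ?_ ?_ hsorted' hxs
      · intro y hy
        rcases (PySem.Set.mem_add seen x y).mp hy with hy | hy
        · exact le_trans (hseen y hy) hxlast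
        · exact le_of_eq hy
      · exact (PySem.Set.mem_add seen x x).mpr (Or.inr rfl)

-- for a nondecreasing list ordered dedupe is the adjacent-comparison dedupe
theorem dedup_sorted (xs : List Int) (hc : xs.IsChain (· ≤ ·)) :
    PySem.List.dedup xs = xs.foldl adjStep [] := by
  have h : xs.Pairwise (· ≤ ·) := List.isChain_iff_pairwise.mp hc
  cases xs with
  | nil => rfl
  | cons x rest =>
    rw [← pvDedupeA_eq_dedup]
    have hstep : adjStep [] x = [x] := by simp [adjStep]
    have hc : PySem.Set.contains (PySem.Set.empty : PySem.Set Int) x = false := rfl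
    have hadd : PySem.Set.add (PySem.Set.empty : PySem.Set Int) x = [x] := rfl
    simp only [pvDedupeA, List.foldl_cons, hc, Bool.false_eq_true, if_false, hadd,
      List.nil_append, hstep]
    exact foldA_eq_adj rest [x] [x] x (by simp) (by simp) (by simp)
      (List.pairwise_cons.mp h).2 (fun z hz => (List.pairwise_cons.mp h).1 z hz)

-- bounds for the two concrete divisors, enough for monotonicity of the remap
theorem pvRoundB_18 (p : Int) (hp : 0 ≤ p) :
    0 ≤ pvRoundB p 18 ∧ p - 9 ≤ 18 * pvRoundB p 18 ∧ 18 * pvRoundB p 18 ≤ p + 9 := by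
  have hdm := PySem.Int.floordiv_mul_add_mod p 18
  have h0 : 0 ≤ PySem.Int.mod p 18 := PySem.Int.mod_nonneg p (by norm_num)
  have h1 : PySem.Int.mod p 18 < 18 := PySem.Int.mod_lt p (by norm_num)
  unfold pvRoundB
  dsimp only
  split_ifs <;> omega

theorem pvRoundB_37 (p : Int) (hp : 0 ≤ p) :
    0 ≤ pvRoundB p 37 ∧ p - 18 ≤ 37 * pvRoundB p 37 ∧ 37 * pvRoundB p 37 ≤ p + 18 := by
  have hdm := PySem.Int.floordiv_mul_add_mod p 37
  have h0 : 0 ≤ PySem.Int.mod p 37 := PySem.Int.mod_nonneg p (by norm_num)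
  have h1 : PySem.Int.mod p 37 < 37 := PySem.Int.mod_lt p (by norm_num)
  unfold pvRoundB
  dsimp only
  split_ifs <;> omega

-- B's per-block scale(block), for stating B as a map-then-fold
def pvScale (td ts block : Int) : Int :=
  if block ≤ 19 then
    if td = 1 then 1 else pvRoundB ((block - 1) * (td - 1)) (19 - 1) + 1
  else
    if ts = 1 then td + 1 else td + pvRoundB ((block - 19 - 1) * (ts - 1)) (38 - 1) + 1

theorem altB_eq (td ts : Int) (hd : 0 < td) (hs : 0 < ts) :
    remap_paper_sparse_flux_indices_py_alt td ts
      = (([1, 15, 36, 41, 48] : List Int).map (pvScale td ts)).foldl adjStep [] := by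
  rw [List.foldl_map]
  unfold remap_paper_sparse_flux_indices_py_alt
  rw [if_neg (by omega), if_neg (by omega)]
  rfl

theorem main_eq (total_double total_single : Int)
    (hd : 0 < total_double) (hs : 0 < total_single) :
    remap_paper_sparse_flux_indices_py total_double total_single
      = remap_paper_sparse_flux_indices_py_alt total_double total_single := by
  have hd0 : ¬ total_double ≤ 0 := by omega
  have hs0 : ¬ total_single ≤ 0 := by omega
  rw [altB_eq _ _ hd hs]
  have hD : pvSourceDoubleIdx = [1, 15] := by decide
  have hS : pvSourceSingleIdx = [17, 22, 29] := by decide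
  simp only [remap_paper_sparse_flux_indices_py, pvRemapStage, hD, hS, hd0, hs0, if_false]
  norm_num [List.foldl]
  rw [pvDedupeA_eq_dedup, pvDedupeA_eq_dedup, pvDedupeA_eq_dedup, dedup_merge]
  have e18 : ∀ p : Int, pvRound p 18 = pvRoundB p 18 := fun p => (pvRoundB_eq p 18 (by norm_num)).symm
  have e37 : ∀ p : Int, pvRound p 37 = pvRoundB p 37 := fun p => (pvRoundB_eq p 37 (by norm_num)).symm
  have h018 : pvRoundB 0 18 = 0 := by decide
  obtain ⟨n14, l14, u14⟩ := pvRoundB_18 (14 * (total_double - 1)) (by omega)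
  obtain ⟨n16, l16, u16⟩ := pvRoundB_37 (16 * (total_single - 1)) (by omega)
  obtain ⟨n21, l21, u21⟩ := pvRoundB_37 (21 * (total_single - 1)) (by omega)
  obtain ⟨n28, l28, u28⟩ := pvRoundB_37 (28 * (total_single - 1)) (by omega)
  simp only [e18, e37, h018]
  by_cases h1 : total_double = 1 <;> by_cases h2 : total_single = 1
  · simp only [h1, h2, reduceIte, List.map_cons, List.map_nil, List.cons_append, List.nil_append]
    rw [dedup_sorted _ (by
      simp only [List.isChain_cons_cons, List.isChain_singleton, and_true]
      omega)]
    congr 1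
  · simp only [h1, if_neg h2, reduceIte, List.map_cons, List.map_nil, List.cons_append, List.nil_append]
    rw [dedup_sorted _ (by
      simp only [List.isChain_cons_cons, List.isChain_singleton, and_true]
      omega)]
    all_goals simp only [pvScale, if_neg h2, reduceIte]
    all_goals norm_num
    all_goals ring_nf
  · simp only [if_neg h1, h2, reduceIte, List.map_cons, List.map_nil, List.cons_append, List.nil_append]
    rw [dedup_sorted _ (by
      simp only [List.isChain_cons_cons, List.isChain_singleton, and_true]
      omega)]
    all_goals simp only [pvScale, if_neg h1, reduceIte]
    all_goals norm_num
    all_goals ring_nf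
    all_goals simp only [h018]
    all_goals ring_nf
  · simp only [if_neg h1, if_neg h2, List.map_cons, List.map_nil, List.cons_append, List.nil_append]
    rw [dedup_sorted _ (by
      simp only [List.isChain_cons_cons, List.isChain_singleton, and_true]
      omega)]
    all_goals simp only [pvScale, if_neg h1, if_neg h2]
    all_goals norm_num
    all_goals ring_nf
    all_goals simp only [h018]
    all_goals ring_nf

-- ===== VERDICT (by name: the statement is the Claim_ definition above) =====
theorem remap_paper_sparse_flux_indices_py_spec : Claim_equal_remap_paper_sparse_flux_indices_py := by
  intro total_double total_single _ hpre
  unfold Spec_remap_paper_sparse_flux_indices_py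
  exact main_eq total_double total_single hpre.1 hpre.2
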